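-- pv_equiv track=rewrite | github.com/SpikeShaun/AWA-GCN-for-MLA2024 | metrics.py | find_aspect_opinion_phrases
-- ===== SOURCE A (Python) =====
-- def find_aspect_opinion_phrases(tags):
--     aspect_phrases = []
--     opinion_phrases = []
--
--     n = len(tags)
--     i = 0
--     # 寻找连续的aspect片段
--     while i < n:
--         if tags[i][i] == 1:
--             start = i
--             while i < n and tags[i][i] == 1:
--                 i += 1
--             aspect_phrases.append((start, i - 1))
--         i += 1
--
--     i = 0
--     # 寻找连续的opinion片段
--     while i < n:
--         if tags[i][i] == 2:
--             start = i
--             while i < n and tags[i][i] == 2: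
--                 i += 1
--             opinion_phrases.append((start, i - 1))
--         i += 1
--     return aspect_phrases, opinion_phrases
-- ===== SOURCE B (Python) =====
-- from itertools import groupby
--
--
-- def find_aspect_opinion_phrases(tags):
--     diag = [row[i] for i, row in enumerate(tags)]
--     aspect_phrases = []
--     opinion_phrases = []
--     idx = 0
--     for val, grp in groupby(diag):
--         ln = sum(1 for _ in grp)
--         run = (idx, idx + ln - 1)
--         if val == 1:
--             aspect_phrases.append(run)
--         elif val == 2:
--             opinion_phrases.append(run)
--         idx += ln
--     return aspect_phrases, opinion_phrases
-- ===== Notes on version B (the rewrite author's own statement) =====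
-- stated objective: simpler
-- what changed: Replaces A's two index-driven while-loop scans (one per tag value, with nested run-skipping loops) by materialising the diagonal once and a single groupby pass over its maximal constant runs, dispatching each run to the aspect or opinion list.
import Mathlib
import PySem

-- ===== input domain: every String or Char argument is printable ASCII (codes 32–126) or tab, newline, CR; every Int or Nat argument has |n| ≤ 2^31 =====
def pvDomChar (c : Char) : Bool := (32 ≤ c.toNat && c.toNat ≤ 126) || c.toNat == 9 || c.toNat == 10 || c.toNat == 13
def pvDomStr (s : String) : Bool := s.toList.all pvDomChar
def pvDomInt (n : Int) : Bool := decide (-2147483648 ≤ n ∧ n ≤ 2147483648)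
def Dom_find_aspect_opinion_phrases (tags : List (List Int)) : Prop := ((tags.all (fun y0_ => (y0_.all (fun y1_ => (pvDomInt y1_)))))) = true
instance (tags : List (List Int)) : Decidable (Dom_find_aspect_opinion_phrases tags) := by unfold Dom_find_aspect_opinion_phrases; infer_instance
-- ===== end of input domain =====

-- B replaces A's two index-driven diagonal scans by one materialised diagonal and a single
-- run-splitting (groupby) pass with a dispatch on the run value; objective: simpler.
-- Equivalence is about the return value; neither program mutates its argument.

-- ===== PORT A =====
-- tags[i][i]: exact under Pre_ (row i long enough); default 0 is never reached inside Pre_.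
def pvDiagAt (tags : List (List Int)) (i : Nat) : Int :=
  PySem.List.pyGetD (PySem.List.pyGetD tags (Int.ofNat i) []) (Int.ofNat i) 0

-- inner 'while i < n and tags[i][i] == v: i += 1'
def pvSkipRun (tags : List (List Int)) (v : Int) (i : Nat) : Nat :=
  if i < tags.length ∧ pvDiagAt tags i = v then pvSkipRun tags v (i + 1) else i
termination_by tags.length - i
decreasing_by omega

theorem pvSkipRun_ge (tags : List (List Int)) (v : Int) (i : Nat) : i ≤ pvSkipRun tags v i := by
  fun_induction pvSkipRun tags v i with
  | case1 i h ih => omega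
  | case2 i h => omega

-- one outer 'while i < n' pass of A, collecting runs of value v
def pvPassLoop (tags : List (List Int)) (v : Int) (i : Nat) (acc : List (Int × Int)) :
    List (Int × Int) :=
  if i < tags.length then
    if pvDiagAt tags i = v then
      let j := pvSkipRun tags v i
      pvPassLoop tags v (j + 1) (acc ++ [((i : Int), (j : Int) - 1)])
    else pvPassLoop tags v (i + 1) acc
  else acc
termination_by tags.length - i
decreasing_by
  · have := pvSkipRun_ge tags v i; omega
  · omega

def find_aspect_opinion_phrases (tags : List (List Int)) :
    (List (Int × Int)) × (List (Int × Int)) :=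
  (pvPassLoop tags 1 0 [], pvPassLoop tags 2 0 [])

-- ===== PORT B =====
-- diag = [row[i] for i, row in enumerate(tags)]  (row[i] exact under Pre_)
def pvDiagList (tags : List (List Int)) : List Int :=
  (PySem.List.enumerate tags).map (fun p => PySem.List.pyGetD p.2 p.1 0)

-- itertools.groupby: the maximal constant runs of a list, as (value, length) pairs
def pvRuns : List Int → List (Int × Nat)
  | [] => []
  | x :: xs =>
    (x, 1 + (xs.takeWhile (· == x)).length) :: pvRuns (xs.dropWhile (· == x))
termination_by l => l.length
decreasing_by
  have := List.length_dropWhile_le (· == x) xs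
  simp; omega

-- the for-loop over the runs, with idx and the two accumulators as state
def pvDispatch : List (Int × Nat) → Nat → List (Int × Int) → List (Int × Int) →
    (List (Int × Int)) × (List (Int × Int))
  | [], _, asp, opi => (asp, opi)
  | (v, ln) :: rest, idx, asp, opi =>
    let run := ((idx : Int), (idx : Int) + (ln : Int) - 1)
    if v = 1 then pvDispatch rest (idx + ln) (asp ++ [run]) opi
    else if v = 2 then pvDispatch rest (idx + ln) asp (opi ++ [run])
    else pvDispatch rest (idx + ln) asp opi

def find_aspect_opinion_phrases_alt (tags : List (List Int)) :
    (List (Int × Int)) × (List (Int × Int)) :=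
  pvDispatch (pvRuns (pvDiagList tags)) 0 [] []

-- ===== PRECONDITION & SPEC =====
-- Pre_ excludes exactly the inputs where Python A raises IndexError: a row shorter than
-- its own (diagonal) index.
def Pre_find_aspect_opinion_phrases (tags : List (List Int)) : Prop :=
  ∀ p ∈ PySem.List.enumerate tags, p.1 < (p.2.length : Int)
instance (tags : List (List Int)) : Decidable (Pre_find_aspect_opinion_phrases tags) := by
  unfold Pre_find_aspect_opinion_phrases; infer_instance

def pvWitness_find_aspect_opinion_phrases : List (List Int) := [[1, 0], [2, 2]]

def Spec_find_aspect_opinion_phrases (tags : List (List Int))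
    (out : (List (Int × Int)) × (List (Int × Int))) : Prop :=
  out = find_aspect_opinion_phrases_alt tags
instance (tags : List (List Int)) (out : (List (Int × Int)) × (List (Int × Int))) :
    Decidable (Spec_find_aspect_opinion_phrases tags out) := by
  unfold Spec_find_aspect_opinion_phrases; infer_instance

-- ===== CLAIM (what is proved, stated in full; the proofs are below) =====
def Claim_equal_find_aspect_opinion_phrases : Prop :=
  ∀ (tags : List (List Int)), Dom_find_aspect_opinion_phrases tags →
    Pre_find_aspect_opinion_phrases tags →
    Spec_find_aspect_opinion_phrases tags (find_aspect_opinion_phrases tags)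

-- ===== LEMMAS AND PROOFS =====

-- the runs of value v among pvRuns, with their (start, end) index pairs
def pvSel (v : Int) : List (Int × Nat) → Nat → List (Int × Int)
  | [], _ => []
  | (x, ln) :: rest, idx =>
    (if x = v then [((idx : Int), (idx : Int) + (ln : Int) - 1)] else []) ++
      pvSel v rest (idx + ln)

theorem pvDispatch_eq (runs : List (Int × Nat)) (idx : Nat)
    (asp opi : List (Int × Int)) :
    pvDispatch runs idx asp opi = (asp ++ pvSel 1 runs idx, opi ++ pvSel 2 runs idx) := by
  induction runs generalizing idx asp opi with
  | nil => simp [pvDispatch, pvSel]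
  | cons p rest ih =>
    obtain ⟨v, ln⟩ := p
    by_cases h1 : v = 1
    · simp [pvDispatch, pvSel, h1, ih]
    · by_cases h2 : v = 2 <;> simp [pvDispatch, pvSel, h1, h2, ih]

theorem pvTakeDrop_chunk (x : Int) (t rest : List Int)
    (hall : ∀ y ∈ t, y = x) (hrest : ∀ y ∈ rest.head?, y ≠ x) :
    (t ++ rest).takeWhile (· == x) = t ∧ (t ++ rest).dropWhile (· == x) = rest := by
  induction t with
  | nil =>
    cases rest with
    | nil => simp
    | cons b bs =>
      have hb : b ≠ x := hrest b (by simp)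
      simp [List.takeWhile_cons, List.dropWhile_cons, hb]
  | cons c cs ih =>
    have hc : c = x := hall c (by simp)
    have := ih (fun y hy => hall y (by simp [hy]))
    simp [List.takeWhile_cons, List.dropWhile_cons, hc, this]

theorem pvRuns_chunk (x : Int) (t rest : List Int) (ht : t ≠ [])
    (hall : ∀ y ∈ t, y = x) (hrest : ∀ y ∈ rest.head?, y ≠ x) :
    pvRuns (t ++ rest) = (x, t.length) :: pvRuns rest := by
  obtain ⟨a, t', rfl⟩ := List.exists_cons_of_ne_nil ht
  have ha : a = x := hall a (by simp)
  have htw := pvTakeDrop_chunk x t' rest (fun y hy => hall y (by simp [hy])) hrest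
  rw [List.cons_append, pvRuns, ha, htw.1, htw.2]
  simp
  omega

theorem pvSel_skip (v x : Int) (xs : List Int) (idx : Nat) (hx : x ≠ v) :
    pvSel v (pvRuns (x :: xs)) idx = pvSel v (pvRuns xs) (idx + 1) := by
  rw [pvRuns]
  set tw := xs.takeWhile (· == x) with htw
  set rest := xs.dropWhile (· == x) with hrest
  have hxs : tw ++ rest = xs := List.takeWhile_append_dropWhile
  have hallt : ∀ y ∈ tw, y = x := by
    intro y hy
    have := List.mem_takeWhile_imp (htw ▸ hy)
    simpa using this
  have hheadr : ∀ y ∈ rest.head?, y ≠ x := by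
    intro y hy
    have := List.head?_dropWhile_not (· == x) xs
    rw [← hrest] at this
    cases h : rest.head? with
    | none => simp [h] at hy
    | some z =>
      simp [h] at hy this
      subst hy; exact this
  cases h : tw with
  | nil =>
    have : rest = xs := by rw [← hxs, h]; simp
    simp [pvSel, hx, h, this]
  | cons a t' =>
    have : pvRuns xs = (x, tw.length) :: pvRuns rest := by
      rw [← hxs]
      exact pvRuns_chunk x tw rest (by simp [h]) hallt hheadr
    rw [this]
    simp only [pvSel, if_neg hx, List.nil_append]
    rw [h]
    congr 1
    simp
    omega

theorem pvDiagList_length (tags : List (List Int)) :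
    (pvDiagList tags).length = tags.length := by
  simp [pvDiagList, PySem.List.length_enumerate]

theorem pvDiagList_get (tags : List (List Int)) (i : Nat) (h : i < tags.length) :
    (pvDiagList tags)[i]'(by rw [pvDiagList_length]; exact h) = pvDiagAt tags i := by
  simp only [pvDiagList, List.getElem_map, PySem.List.getElem_enumerate]
  simp [pvDiagAt, PySem.List.pyGetD_natCast, List.getD_eq_getElem?_getD,
    List.getElem?_eq_getElem h]

theorem pvDiag_drop (tags : List (List Int)) (i : Nat) (h : i < tags.length) :
    (pvDiagList tags).drop i = pvDiagAt tags i :: (pvDiagList tags).drop (i + 1) := by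
  rw [List.drop_eq_getElem_cons (by rw [pvDiagList_length]; exact h)]
  rw [pvDiagList_get tags i h]

theorem pvDiag_drop_nil (tags : List (List Int)) (i : Nat) (h : ¬ i < tags.length) :
    (pvDiagList tags).drop i = [] := by
  apply List.drop_eq_nil_of_le
  rw [pvDiagList_length]; omega

theorem pvSkipRun_eq (tags : List (List Int)) (v : Int) (i : Nat) :
    pvSkipRun tags v i
      = i + (((pvDiagList tags).drop i).takeWhile (· == v)).length := by
  fun_induction pvSkipRun tags v i with
  | case1 i h ih =>
    rw [pvDiag_drop tags i h.1]
    have : pvDiagAt tags i == v := by simp [h.2]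
    simp only [List.takeWhile_cons, this, if_pos]
    simp only [List.length_cons]
    omega
  | case2 i h =>
    by_cases hi : i < tags.length
    · have hv : pvDiagAt tags i ≠ v := fun hc => h ⟨hi, hc⟩
      rw [pvDiag_drop tags i hi]
      simp [List.takeWhile_cons, hv]
    · rw [pvDiag_drop_nil tags i hi]; simp

theorem pvDropWhile_eq_drop (p : Int → Bool) (l : List Int) :
    l.dropWhile p = l.drop (l.takeWhile p).length := by
  induction l with
  | nil => simp
  | cons a t ih =>
    by_cases h : p a <;>
      simp [List.dropWhile_cons, List.takeWhile_cons, h, ih]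

theorem pvHead_dropWhile (p : Int → Bool) (l : List Int) (x : Int) (t : List Int)
    (h : l.dropWhile p = x :: t) : p x = false := by
  induction l with
  | nil => simp at h
  | cons a l ih =>
    rw [List.dropWhile_cons] at h
    by_cases hp : p a = true
    · rw [if_pos hp] at h
      exact ih h
    · rw [if_neg hp] at h
      injection h with h1 _
      rw [← h1]
      simpa using hp

theorem pvSkipRun_drop (tags : List (List Int)) (v : Int) (i : Nat) :
    (pvDiagList tags).drop (pvSkipRun tags v i)
      = ((pvDiagList tags).drop i).dropWhile (· == v) := by
  rw [pvSkipRun_eq, pvDropWhile_eq_drop, List.drop_drop]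

theorem pvPassLoop_eq (tags : List (List Int)) (v : Int) (i : Nat)
    (acc : List (Int × Int)) :
    pvPassLoop tags v i acc
      = acc ++ pvSel v (pvRuns ((pvDiagList tags).drop i)) i := by
  fun_induction pvPassLoop tags v i acc with
  | case1 i acc hi hv j ih =>
    rw [ih, pvDiag_drop tags i hi, pvRuns, hv]
    set tw := (((pvDiagList tags).drop (i + 1)).takeWhile (· == v)) with htw
    have hj : j = i + 1 + tw.length := by
      show pvSkipRun tags v i = _
      rw [pvSkipRun_eq, pvDiag_drop tags i hi]
      simp [List.takeWhile_cons, hv, htw]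
      omega
    have hdropj : (pvDiagList tags).drop j
        = ((pvDiagList tags).drop (i + 1)).dropWhile (· == v) := by
      have h1 := pvSkipRun_drop tags v i
      rw [pvDiag_drop tags i hi] at h1
      rw [show j = pvSkipRun tags v i from rfl, h1]
      simp [List.dropWhile_cons, hv]
    -- the recursion restarts at j+1; index j (value ≠ v, or past the end) contributes nothing
    have hskip : pvSel v (pvRuns ((pvDiagList tags).drop j)) j
        = pvSel v (pvRuns ((pvDiagList tags).drop (j + 1))) (j + 1) := by
      by_cases hjn : j < tags.length
      · have hcons := pvDiag_drop tags j hjn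
        have hne : pvDiagAt tags j ≠ v := by
          have hd := hdropj
          rw [hcons] at hd
          have := pvHead_dropWhile (· == v) ((pvDiagList tags).drop (i + 1)) _ _ hd.symm
          simpa using this
        rw [hcons, pvSel_skip v _ _ j hne]
      · rw [pvDiag_drop_nil tags j hjn, pvDiag_drop_nil tags (j + 1) (by omega)]
        simp [pvRuns, pvSel]
    rw [← hdropj]
    simp only [pvSel, eq_self_iff_true, if_true, List.append_assoc, List.nil_append]
    have hidx : i + (1 + tw.length) = j := by omega
    rw [hidx, hskip]
    have hend : (i : Int) + ((1 + tw.length : Nat) : Int) - 1 = (j : Int) - 1 := by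
      rw [hj]
      push_cast
      ring
    rw [hend]
  | case2 i acc hi hv ih =>
    rw [ih, pvDiag_drop tags i hi, pvSel_skip v _ _ i hv]
  | case3 i acc hi =>
    rw [pvDiag_drop_nil tags i hi]
    simp [pvRuns, pvSel]

-- ===== VERDICT (by name: the statement is the Claim_ definition above) =====
theorem find_aspect_opinion_phrases_spec : Claim_equal_find_aspect_opinion_phrases := by
  intro tags _ _
  show find_aspect_opinion_phrases tags = find_aspect_opinion_phrases_alt tags
  unfold find_aspect_opinion_phrases find_aspect_opinion_phrases_alt
  rw [pvDispatch_eq, pvPassLoop_eq, pvPassLoop_eq]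
  simp
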